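-- pv_equiv track=rewrite | github.com/stefanofante/nqueen | nqueens/fitness.py | fitness_f5
-- ===== SOURCE A (Python) =====
-- from collections import Counter
-- from typing import Callable, Sequence
--
-- def fitness_f5(board: Sequence[int]) -> float:
--     """Apply a quadratic penalty to diagonal clusters (strong discouragement).
--
--     Clusters on the same diagonal incur a squared penalty to more strongly
--     penalize larger clusters.
--     """
--     diag1: Counter[int] = Counter()
--     diag2: Counter[int] = Counter()
--     for column, row in enumerate(board):
--         diag1[row - column] += 1
--         diag2[row + column] += 1
--
--     penalty = 0
--     for count in diag1.values():
--         if count > 1: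
--             penalty += count ** 2
--     for count in diag2.values():
--         if count > 1:
--             penalty += count ** 2
--
--     n = len(board)
--     max_pairs = n * (n - 1) // 2
--     return max_pairs - penalty
-- ===== SOURCE B (Python) =====
-- def _run_lengths(keys):
--     """Run lengths of maximal blocks of equal consecutive values (keys sorted):
--     scan the block equal to keys[i], record its length, continue after it."""
--     lens = []
--     i = 0
--     n = len(keys)
--     while i < n:
--         j = i + 1
--         while j < n and keys[j] == keys[i]:
--             j += 1
--         lens.append(j - i)
--         i = j
--     return lens
--
--
-- def fitness_f5(board):
--     n = len(board)
--     penalty = 0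
--     for keys in ([row - col for col, row in enumerate(board)],
--                  [row + col for col, row in enumerate(board)]):
--         for run in _run_lengths(sorted(keys)):
--             if run > 1:
--                 penalty += run * run
--     return n * (n - 1) // 2 - penalty
-- ===== Notes on version B (the rewrite author's own statement) =====
-- stated objective: alternative
-- what changed: Replaces the two Counter hash maps with a sort of each diagonal-key list followed by a run-length scan of consecutive equal keys; run lengths > 1 contribute their square to the penalty.
import Mathlib
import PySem

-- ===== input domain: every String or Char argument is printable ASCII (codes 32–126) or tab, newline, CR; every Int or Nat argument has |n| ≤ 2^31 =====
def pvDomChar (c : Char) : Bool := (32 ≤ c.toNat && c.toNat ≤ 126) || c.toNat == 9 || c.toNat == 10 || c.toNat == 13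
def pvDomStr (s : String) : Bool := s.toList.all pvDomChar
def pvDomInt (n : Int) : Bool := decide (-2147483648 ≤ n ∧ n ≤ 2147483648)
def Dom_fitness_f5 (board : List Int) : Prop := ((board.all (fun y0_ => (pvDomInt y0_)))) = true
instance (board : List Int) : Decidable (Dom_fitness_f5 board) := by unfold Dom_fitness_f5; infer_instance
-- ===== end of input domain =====

-- B replaces A's two Counter hash maps by sorting each diagonal-key list and
-- scanning runs of equal consecutive keys (objective: alternative algorithm).

-- ===== PORT A =====
def fitness_f5 (board : List Int) : Int :=
  let dicts := (PySem.List.enumerate board).foldl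
      (fun (d : PySem.Dict Int Int × PySem.Dict Int Int) p =>
        (d.1.modify (p.2 - p.1) 0 (· + 1), d.2.modify (p.2 + p.1) 0 (· + 1)))
      (PySem.Dict.empty, PySem.Dict.empty)
  let pen1 := dicts.1.values.foldl (fun pen c => if c > 1 then pen + c ^ 2 else pen) 0
  let pen2 := dicts.2.values.foldl (fun pen c => if c > 1 then pen + c ^ 2 else pen) pen1
  let n : Int := board.length
  PySem.Int.floordiv (n * (n - 1)) 2 - pen2

-- ===== PORT B =====
-- _run_lengths: the inner while computes the block of keys equal to the head
-- (takeWhile on the tail), the outer loop recurses on the rest (dropWhile).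
def runLengths (keys : List Int) : List Int :=
  match keys with
  | [] => []
  | a :: t =>
      ((1 : Int) + (t.takeWhile (fun x => x == a)).length)
        :: runLengths (t.dropWhile (fun x => x == a))
termination_by keys.length
decreasing_by
  simp only [List.length_cons]
  exact Nat.lt_succ_of_le (List.length_dropWhile_le _ _)

def fitness_f5_alt (board : List Int) : Int :=
  let keys1 := (PySem.List.enumerate board).map (fun p => p.2 - p.1)
  let keys2 := (PySem.List.enumerate board).map (fun p => p.2 + p.1)
  let pen1 := (runLengths (PySem.List.sorted keys1 (fun x => x))).foldl
      (fun pen run => if run > 1 then pen + run * run else pen) 0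
  let pen2 := (runLengths (PySem.List.sorted keys2 (fun x => x))).foldl
      (fun pen run => if run > 1 then pen + run * run else pen) pen1
  let n : Int := board.length
  PySem.Int.floordiv (n * (n - 1)) 2 - pen2

-- ===== PRECONDITION & SPEC =====
def Spec_fitness_f5 (board : List Int) (out : Int) : Prop := out = fitness_f5_alt board
instance (board : List Int) (out : Int) : Decidable (Spec_fitness_f5 board out) := by unfold Spec_fitness_f5; infer_instance

-- ===== CLAIM (what is proved, stated in full; the proofs are below) =====
def Claim_equal_fitness_f5 : Prop := ∀ (board : List Int), Dom_fitness_f5 board → Spec_fitness_f5 board (fitness_f5 board)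

-- ===== LEMMAS AND PROOFS =====

def pvF (c : Int) : Int := if 1 < c then c * c else 0

theorem foldl_penA (l : List Int) (p : Int) :
    l.foldl (fun pen c => if c > 1 then pen + c ^ 2 else pen) p
      = p + (l.map pvF).sum := by
  induction l generalizing p with
  | nil => simp
  | cons a t ih =>
      simp only [List.foldl_cons, List.map_cons, List.sum_cons, ih, pvF]
      split_ifs <;> ring

theorem foldl_penB (l : List Int) (p : Int) :
    l.foldl (fun pen run => if run > 1 then pen + run * run else pen) p
      = p + (l.map pvF).sum := by
  induction l generalizing p with
  | nil => simp
  | cons a t ih =>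
      simp only [List.foldl_cons, List.map_cons, List.sum_cons, ih, pvF]
      split_ifs <;> ring

-- splitting A's single loop over two dicts
theorem foldl_pair_split (l : List (Int × Int)) (d1 d2 : PySem.Dict Int Int) :
    l.foldl (fun (d : PySem.Dict Int Int × PySem.Dict Int Int) p =>
        (d.1.modify (p.2 - p.1) 0 (· + 1), d.2.modify (p.2 + p.1) 0 (· + 1))) (d1, d2)
      = (l.foldl (fun d p => d.modify (p.2 - p.1) 0 (· + 1)) d1,
         l.foldl (fun d p => d.modify (p.2 + p.1) 0 (· + 1)) d2) := by
  induction l generalizing d1 d2 with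
  | nil => rfl
  | cons a t ih => simp only [List.foldl_cons, ih]

theorem foldl_modify_key_eq_counter (l : List (Int × Int)) (key : Int × Int → Int) :
    l.foldl (fun (d : PySem.Dict Int Int) p => d.modify (key p) 0 (· + 1)) PySem.Dict.empty
      = PySem.Dict.counter (l.map key) := by
  rw [PySem.Dict.counter_eq_foldl, List.foldl_map]

-- run-length scan of a sorted list = counts of some nodup enumeration of its elements
theorem runLengths_spec (l : List Int) (hs : l.Pairwise (· ≤ ·)) :
    ∃ d : List Int, d.Nodup ∧ (∀ x, x ∈ d ↔ x ∈ l) ∧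
      runLengths l = d.map (fun k => (l.count k : Int)) := by
  induction l using runLengths.induct with
  | case1 => exact ⟨[], by simp, by simp, by simp [runLengths]⟩
  | case2 a t ih =>
      set tw := t.takeWhile (fun x => x == a) with htw
      set dr := t.dropWhile (fun x => x == a) with hdr
      have hsplit : t = tw ++ dr := (List.takeWhile_append_dropWhile).symm
      have htp : t.Pairwise (· ≤ ·) := (List.pairwise_cons.mp hs).2
      have hat : ∀ x ∈ t, a ≤ x := (List.pairwise_cons.mp hs).1
      have hdrp : dr.Pairwise (· ≤ ·) := htp.sublist (List.dropWhile_sublist _)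
      have htwa : ∀ x ∈ tw, x = a := by
        intro x hx
        have := List.mem_takeWhile_imp (l := t) (p := fun x => x == a) hx
        simpa using this
      -- no copy of a survives in dr
      have hadr : a ∉ dr := by
        intro ha
        cases hdr_eq : dr with
        | nil => rw [hdr_eq] at ha; simp at ha
        | cons b dr' =>
            have hb : ¬ ((b == a) = true) := by
              have := List.head?_dropWhile_not (p := fun x => x == a) (l := t)
              rw [← hdr, hdr_eq] at this; simpa using this
            have hbne : b ≠ a := by simpa using hb
            have hble : ∀ x ∈ dr', b ≤ x := by
              have := hdrp; rw [hdr_eq] at this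
              exact (List.pairwise_cons.mp this).1
            have hab : a ≤ b := hat b (by rw [hsplit, hdr_eq]; simp)
            rw [hdr_eq] at ha
            rcases List.mem_cons.mp ha with h | h
            · exact hbne h.symm
            · have h1 : b ≤ a := hble a h
              have h2 : a < b := lt_of_le_of_ne hab (Ne.symm hbne)
              omega
      obtain ⟨d', hnd', hmem', heq'⟩ := ih hdrp
      refine ⟨a :: d', ?_, ?_, ?_⟩
      · exact List.nodup_cons.mpr ⟨fun h => hadr ((hmem' a).mp h), hnd'⟩
      · intro x
        simp only [List.mem_cons, hmem' x]
        constructor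
        · rintro (rfl | h)
          · exact .inl rfl
          · exact .inr (by rw [hsplit]; exact List.mem_append_right _ h)
        · rintro (rfl | h)
          · exact .inl rfl
          · rw [hsplit] at h
            rcases List.mem_append.mp h with h | h
            · exact .inl (htwa x h)
            · exact .inr h
      · rw [runLengths, ← htw, ← hdr]
        have hcnt_a : (a :: t).count a = 1 + tw.length := by
          have h1 : tw.count a = tw.length :=
            List.count_eq_length.mpr (fun x hx => by rw [htwa x hx])
          have h2 : dr.count a = 0 := List.count_eq_zero.mpr hadr
          rw [List.count_cons_self, hsplit, List.count_append, h1, h2]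
          omega
        have hcnt_ne : ∀ x ∈ d', (a :: t).count x = dr.count x := by
          intro x hx
          have hxdr : x ∈ dr := (hmem' x).mp hx
          have hxa : x ≠ a := fun h => hadr (h ▸ hxdr)
          have h1 : tw.count x = 0 := List.count_eq_zero.mpr
            (fun h => hxa (htwa x h))
          rw [List.count_cons_of_ne (Ne.symm hxa), hsplit, List.count_append, h1]
          omega
        rw [heq']
        simp only [List.map_cons]
        congr 1
        · rw [hcnt_a]; push_cast; ring
        · rw [List.map_inj_left]
          intro x hx
          rw [hcnt_ne x hx]

-- penalty contribution of one diagonal-key list is the same on both sides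
theorem pen_eq (ks : List Int) :
    (((PySem.Set.ofList ks).map (fun k => ((ks.count k : Int)))).map pvF).sum
      = ((runLengths (PySem.List.sorted ks (fun x => x))).map pvF).sum := by
  set s := PySem.List.sorted ks (fun x => x) with hsdef
  have hperm : s.Perm ks := PySem.List.sorted_perm ks (fun x => x) false
  have hpw : s.Pairwise (· ≤ ·) := by
    have := PySem.List.sorted_pairwise (xs := ks) (key := fun x => x)
    simpa using this
  obtain ⟨d, hnd, hmem, heq⟩ := runLengths_spec s hpw
  have hof_nodup : (PySem.Set.ofList ks : List Int).Nodup := PySem.Set.nodup_ofList ks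
  have hp : (PySem.Set.ofList ks : List Int).Perm d := by
    rw [List.perm_ext_iff_of_nodup hof_nodup hnd]
    intro x
    rw [PySem.Set.mem_ofList, hmem, hperm.mem_iff]
  have hcnt : ∀ k, s.count k = ks.count k := fun k => hperm.count_eq k
  rw [heq, List.map_map, List.map_map]
  apply List.Perm.sum_eq
  have hfun : (pvF ∘ fun k => ((s.count k : Int))) = (pvF ∘ fun k => ((ks.count k : Int))) := by
    funext k; simp [Function.comp, hcnt]
  rw [hfun]
  exact hp.map _

-- ===== VERDICT (by name: the statement is the Claim_ definition above) =====
theorem fitness_f5_spec : Claim_equal_fitness_f5 := by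
  intro board _
  show fitness_f5 board = fitness_f5_alt board
  unfold fitness_f5 fitness_f5_alt
  simp only [foldl_pair_split, foldl_modify_key_eq_counter, foldl_penA, foldl_penB]
  have hv : ∀ (ks : List Int),
      (PySem.Dict.counter ks).values
        = (PySem.Set.ofList ks).map (fun k => ((ks.count k : Int))) := by
    intro ks
    simp only [PySem.Dict.values, PySem.Dict.items_counter, List.map_map]
    rfl
  rw [hv, hv, pen_eq, pen_eq]
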